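-- pv_equiv track=rewrite | github.com/rb718/codeChallenges | get_max_perfect_set.py | get_max_perfect_set
-- ===== SOURCE A (Python) =====
-- def get_max_perfect_set(n, lst):
--     # sort the lst in increasing order
--     lst.sort()
--
--     # create a dp array of size n and initialise values with 1
--     dp = [1]*n
--
--     # traverse lst from i=0 to end of lst
--     for i in range(n):
--         # traverse lst from j=i-1 to 0
--         for j in range(i-1, -1, -1):
--             # if following condition passes, then update dp[i] with max(dp[i], dp[j]+1)
--             if lst[j]*lst[j] == lst[i]:
--                 dp[i] = max([dp[i], 1+dp[j]])
--
--     # if max(dp) == 1, then return -1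
--     if max(dp) == 1 :
--         return -1
--
--     # else return max(dp) which is the max perfect set size
--     return max(dp)
-- ===== SOURCE B (Python) =====
-- def get_max_perfect_set(n, lst):
--     # single ascending pass over the sorted prefix: pend maps v*v -> best chain length whose next element is v*v
--     lst.sort()
--     pend = {}
--     chains = []
--     for i in range(n):
--         x = lst[i]
--         cur = pend.get(x, 0) + 1
--         chains.append(cur)
--         sq = x * x
--         if pend.get(sq, 0) < cur:
--             pend[sq] = cur
--     m = max(chains)
--     return m if m > 1 else -1
-- ===== Notes on version B (the rewrite author's own statement) =====
-- stated objective: faster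
-- what changed: Replaced the quadratic dp with an inner backward scan per element by a single ascending pass over the sorted prefix that keeps a dict mapping each square v*v to the best chain length reachable at it, so the inner scan disappears.
-- outside the precondition, e.g. on get_max_perfect_set(1, []): A returns -1, B raises IndexError
import Mathlib
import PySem

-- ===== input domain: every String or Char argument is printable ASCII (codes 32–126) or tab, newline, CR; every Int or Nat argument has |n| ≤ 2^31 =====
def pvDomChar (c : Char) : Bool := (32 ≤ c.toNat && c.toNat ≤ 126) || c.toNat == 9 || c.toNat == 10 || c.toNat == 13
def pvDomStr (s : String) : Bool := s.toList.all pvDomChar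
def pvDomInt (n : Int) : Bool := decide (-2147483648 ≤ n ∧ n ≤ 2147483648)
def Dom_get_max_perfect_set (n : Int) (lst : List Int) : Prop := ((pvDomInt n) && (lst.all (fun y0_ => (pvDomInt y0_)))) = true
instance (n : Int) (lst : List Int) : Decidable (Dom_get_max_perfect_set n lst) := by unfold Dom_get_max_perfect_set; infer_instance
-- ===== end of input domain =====

-- B replaces A's quadratic dp (an inner backward scan per element) by one ascending pass over the
-- sorted prefix keeping a dict square -> best chain length; equivalence is about the RETURN value
-- (A and B both sort lst in place).

-- ===== PORT A =====
def get_max_perfect_set (n : Int) (lst : List Int) : Int :=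
  let s := PySem.List.sorted lst (fun x => x)
  let dp0 : List Int := List.replicate n.toNat 1
  let dp := (PySem.List.pyRange 0 n).foldl (fun dp i =>
      (PySem.List.pyRange (i - 1) (-1) (-1)).foldl (fun dp j =>
        if PySem.List.pyGetD s j 0 * PySem.List.pyGetD s j 0 = PySem.List.pyGetD s i 0 then
          PySem.List.pySetD dp i (max (PySem.List.pyGetD dp i 0) (1 + PySem.List.pyGetD dp j 0))
        else dp) dp) dp0
  let m := (PySem.List.max? dp (fun y => y)).getD 0
  if m = 1 then -1 else m

-- ===== PORT B =====
def get_max_perfect_set_alt (n : Int) (lst : List Int) : Int :=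
  let s := PySem.List.sorted lst (fun x => x)
  let r := (PySem.List.pyRange 0 n).foldl (fun (p : List Int × PySem.Dict Int Int) i =>
      let x := PySem.List.pyGetD s i 0
      let cur := p.2.getD x 0 + 1
      let chains := p.1 ++ [cur]
      let pend := if p.2.getD (x * x) 0 < cur then p.2.insert (x * x) cur else p.2
      (chains, pend)) ([], PySem.Dict.empty)
  let m := (PySem.List.max? r.1 (fun y => y)).getD 0
  if m > 1 then m else -1

-- ===== PRECONDITION & SPEC =====
-- A raises outside 1 ≤ n ≤ len(lst) (ValueError on max([]) when n ≤ 0, IndexError on lst[j]/lst[i] when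
-- 2 ≤ n > len(lst)), except at n = 1 with lst = [], where A returns -1 (its inner loop never indexes) but
-- B's lst[0] raises IndexError — that one input family is the only A-returning input Pre_ excludes.
def Pre_get_max_perfect_set (n : Int) (lst : List Int) : Prop := 1 ≤ n ∧ n ≤ (lst.length : Int)
instance (n : Int) (lst : List Int) : Decidable (Pre_get_max_perfect_set n lst) := by unfold Pre_get_max_perfect_set; infer_instance
def pvWitness_get_max_perfect_set : Int × List Int := (2, [2, 4])

def Spec_get_max_perfect_set (n : Int) (lst : List Int) (out : Int) : Prop := out = get_max_perfect_set_alt n lst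
instance (n : Int) (lst : List Int) (out : Int) : Decidable (Spec_get_max_perfect_set n lst out) := by unfold Spec_get_max_perfect_set; infer_instance

-- ===== CLAIM (what is proved, stated in full; the proofs are below) =====
def Claim_equal_get_max_perfect_set : Prop := ∀ (n : Int) (lst : List Int), Dom_get_max_perfect_set n lst → Pre_get_max_perfect_set n lst → Spec_get_max_perfect_set n lst (get_max_perfect_set n lst)

-- ===== LEMMAS AND PROOFS =====

-- the common functional spec: process values left to right, recording (value, chain length) pairs
def pvMM (acc : List (Int × Int)) (v : Int) : Int :=
  acc.foldl (fun m p => if p.1 * p.1 = v then max m p.2 else m) 0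

def pvDps : List (Int × Int) → List Int → List (Int × Int)
  | acc, [] => acc
  | acc, x :: r => pvDps (acc ++ [(x, 1 + pvMM acc x)]) r

-- dp after the first K outer iterations of A
def pvArr (t : List Int) (N K : Nat) : List Int :=
  (pvDps [] (t.take K)).map (·.2) ++ List.replicate (N - K) 1

theorem pv_init_le_foldl_if_max {α : Type} (c : α → Prop) [DecidablePred c] (g : α → Int) :
    ∀ (l : List α) (a : Int), a ≤ l.foldl (fun m p => if c p then max m (g p) else m) a := by
  intro l
  induction l with
  | nil => intro a; simp
  | cons x r ih =>
      intro a
      refine le_trans ?_ (ih (if c x then max a (g x) else a))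
      split <;> simp

theorem pv_foldl_if_max_out {α : Type} (c : α → Prop) [DecidablePred c] (g : α → Int) :
    ∀ (l : List α) (a b : Int),
      l.foldl (fun m p => if c p then max m (g p) else m) (max a b)
        = max (l.foldl (fun m p => if c p then max m (g p) else m) a) b := by
  intro l
  induction l with
  | nil => intro a b; simp
  | cons x r ih =>
      intro a b
      by_cases hc : c x
      · simp only [List.foldl_cons, if_pos hc, max_right_comm a b (g x)]
        exact ih _ b
      · simp only [List.foldl_cons, if_neg hc]
        exact ih a b

theorem pv_foldl_if_max_reverse {α : Type} (c : α → Prop) [DecidablePred c] (g : α → Int) :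
    ∀ (l : List α) (a : Int),
      l.reverse.foldl (fun m p => if c p then max m (g p) else m) a
        = l.foldl (fun m p => if c p then max m (g p) else m) a := by
  intro l
  induction l with
  | nil => intro a; simp
  | cons x r ih =>
      intro a
      simp only [List.reverse_cons, List.foldl_append, List.foldl_cons, List.foldl_nil, ih]
      by_cases hc : c x
      · simp only [if_pos hc]
        exact (pv_foldl_if_max_out c g r a (g x)).symm
      · simp only [if_neg hc]

theorem pv_foldl_if_max_shift {α : Type} (c : α → Prop) [DecidablePred c] (g : α → Int) :
    ∀ (l : List α) (a : Int),
      l.foldl (fun m p => if c p then max m (1 + g p) else m) (1 + a)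
        = 1 + l.foldl (fun m p => if c p then max m (g p) else m) a := by
  intro l
  induction l with
  | nil => intro a; simp
  | cons x r ih =>
      intro a
      by_cases hc : c x
      · have hmx : max (1 + a) (1 + g x) = 1 + max a (g x) := by
          rcases le_total a (g x) with h | h
          · rw [max_eq_right h, max_eq_right (by omega : (1 : Int) + a ≤ 1 + g x)]
          · rw [max_eq_left h, max_eq_left (by omega : (1 : Int) + g x ≤ 1 + a)]
        simp only [List.foldl_cons, if_pos hc, hmx]
        exact ih _
      · simp only [List.foldl_cons, if_neg hc]
        exact ih a

theorem pv_foldl_range_getD {α β : Type} (f : β → α → β) (d : α) :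
    ∀ (l : List α) (a : β),
      (List.range l.length).foldl (fun m j => f m (l.getD j d)) a = l.foldl f a := by
  intro l
  induction l with
  | nil => intro a; simp
  | cons x r ih =>
      intro a
      rw [List.length_cons, List.range_succ_eq_map, List.foldl_cons, List.foldl_map]
      simpa using ih (f a x)

theorem pvMM_nonneg (acc : List (Int × Int)) (v : Int) : 0 ≤ pvMM acc v :=
  pv_init_le_foldl_if_max _ _ acc 0

theorem pvMM_append (acc : List (Int × Int)) (x c v : Int) :
    pvMM (acc ++ [(x, c)]) v = if x * x = v then max (pvMM acc v) c else pvMM acc v := by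
  simp [pvMM]

theorem pvDps_append : ∀ (q : List Int) (acc : List (Int × Int)) (x : Int),
    pvDps acc (q ++ [x]) = pvDps acc q ++ [(x, 1 + pvMM (pvDps acc q) x)] := by
  intro q
  induction q with
  | nil => intro acc x; simp [pvDps]
  | cons y r ih => intro acc x; simpa [pvDps] using ih _ x

theorem pvDps_fst : ∀ (q : List Int) (acc : List (Int × Int)),
    (pvDps acc q).map (·.1) = acc.map (·.1) ++ q := by
  intro q
  induction q with
  | nil => intro acc; simp [pvDps]
  | cons x r ih => intro acc; simp [pvDps, ih]

theorem pvDps_length (q : List Int) (acc : List (Int × Int)) :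
    (pvDps acc q).length = acc.length + q.length := by
  have h := congrArg List.length (pvDps_fst q acc)
  simpa using h

theorem pvDps_snd_ge_one : ∀ (q : List Int) (acc : List (Int × Int)),
    (∀ p ∈ acc, (1 : Int) ≤ p.2) → ∀ p ∈ pvDps acc q, (1 : Int) ≤ p.2 := by
  intro q
  induction q with
  | nil => intro acc h; simpa [pvDps] using h
  | cons x r ih =>
      intro acc h
      refine ih _ ?_
      intro p hp
      rcases List.mem_append.1 hp with h1 | h1
      · exact h p h1
      · simp only [List.mem_singleton] at h1
        subst h1
        have := pvMM_nonneg acc x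
        show (1 : Int) ≤ 1 + pvMM acc x
        omega

theorem pv_pySetD_natCast {α : Type} (xs : List α) (n : Nat) (v : α) (h : n < xs.length) :
    PySem.List.pySetD xs (↑n) v = xs.set n v := by
  simp [PySem.List.pySetD, PySem.List.pySet?, PySem.List.pyIdx?, h]

-- A's inner backward scan only updates slot I, reading slots k < I of the original dp
theorem pv_innerA (s : List Int) (I N : Nat) (hIN : I < N) :
    ∀ (kl : List Int) (dp : List Int), dp.length = N →
      (∀ j ∈ kl, ∃ k : Nat, j = (k : Int) ∧ k < I) →
      kl.foldl (fun dp j =>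
          if PySem.List.pyGetD s j 0 * PySem.List.pyGetD s j 0 = PySem.List.pyGetD s (I : Int) 0 then
            PySem.List.pySetD dp (I : Int)
              (max (PySem.List.pyGetD dp (I : Int) 0) (1 + PySem.List.pyGetD dp j 0))
          else dp) dp
        = dp.set I (kl.foldl (fun m j =>
            if PySem.List.pyGetD s j 0 * PySem.List.pyGetD s j 0 = PySem.List.pyGetD s (I : Int) 0 then
              max m (1 + PySem.List.pyGetD dp j 0)
            else m) (PySem.List.pyGetD dp (I : Int) 0)) := by
  intro kl
  induction kl with
  | nil =>
      intro dp hlen _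
      have hI : I < dp.length := by omega
      simp only [List.foldl_nil, PySem.List.pyGetD_natCast, List.getD_eq_getElem?_getD,
        List.getElem?_eq_getElem hI, Option.getD_some, List.set_getElem_self hI]
  | cons j r ih =>
      intro dp hlen hk
      obtain ⟨k, hjk, hkI⟩ := hk j (List.mem_cons_self)
      have hI : I < dp.length := by omega
      by_cases hc : PySem.List.pyGetD s j 0 * PySem.List.pyGetD s j 0 = PySem.List.pyGetD s (I : Int) 0
      · simp only [List.foldl_cons, if_pos hc]
        set v := max (PySem.List.pyGetD dp (I : Int) 0) (1 + PySem.List.pyGetD dp j 0) with hv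
        rw [pv_pySetD_natCast dp I v hI]
        have hlen1 : (dp.set I v).length = N := by simpa using hlen
        rw [ih (dp.set I v) hlen1 (fun j' hj' => hk j' (List.mem_cons_of_mem _ hj'))]
        have hgetI : PySem.List.pyGetD (dp.set I v) (I : Int) 0 = v := by
          rw [PySem.List.pyGetD_natCast, List.getD_eq_getElem?_getD, List.getElem?_set_self (by omega)]
          rfl
        have hcong : ∀ (m : Int), ∀ j' ∈ r,
            (if PySem.List.pyGetD s j' 0 * PySem.List.pyGetD s j' 0 = PySem.List.pyGetD s (I : Int) 0
              then max m (1 + PySem.List.pyGetD (dp.set I v) j' 0) else m)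
              = (if PySem.List.pyGetD s j' 0 * PySem.List.pyGetD s j' 0 = PySem.List.pyGetD s (I : Int) 0
              then max m (1 + PySem.List.pyGetD dp j' 0) else m) := by
          intro m j' hj'
          obtain ⟨k', hjk', hkI'⟩ := hk j' (List.mem_cons_of_mem _ hj')
          have hne : I ≠ k' := by omega
          subst hjk'
          have e1 : PySem.List.pyGetD (dp.set I v) ((k' : Nat) : Int) 0
              = PySem.List.pyGetD dp ((k' : Nat) : Int) 0 := by
            rw [PySem.List.pyGetD_natCast, PySem.List.pyGetD_natCast,
              List.getD_eq_getElem?_getD, List.getD_eq_getElem?_getD,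
              List.getElem?_set_ne hne]
          rw [e1]
        rw [PySem.List.foldl_congr_mem r _ _ _ hcong]
        rw [List.set_set, hgetI]
      · simp only [List.foldl_cons, if_neg hc]
        exact ih dp hlen (fun j' hj' => hk j' (List.mem_cons_of_mem _ hj'))

theorem pvArr_length (t : List Int) (N K : Nat) (hK : K ≤ N) (ht : t.length = N) :
    (pvArr t N K).length = N := by
  have h1 : (t.take K).length = K := by simp [ht]; omega
  simp [pvArr, pvDps_length, h1]
  omega

theorem pv_fold_idx (X : Int) (acc : List (Int × Int)) :
    (List.range acc.length).foldl
      (fun m j => if (acc.getD j (0, 0)).1 * (acc.getD j (0, 0)).1 = X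
        then max m (1 + (acc.getD j (0, 0)).2) else m) 1
    = 1 + pvMM acc X := by
  rw [pv_foldl_range_getD (fun m p => if p.1 * p.1 = X then max m (1 + p.2) else m)
    ((0 : Int), (0 : Int)) acc 1]
  have hshift := pv_foldl_if_max_shift (fun p : Int × Int => p.1 * p.1 = X) (·.2) acc 0
  simp only [add_zero] at hshift
  rw [hshift]
  rfl

-- one outer iteration of A applied to pvArr
theorem pvArr_succ (t : List Int) (N K : Nat) (hK : K < N) (ht : t.length = N) :
    (pvArr t N K).set K (1 + pvMM (pvDps [] (t.take K)) (t.getD K 0)) = pvArr t N (K + 1) := by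
  have hKt : K < t.length := by omega
  have hlenK : ((pvDps [] (t.take K)).map (·.2)).length = K := by
    simp [pvDps_length]; omega
  have htake : t.take (K + 1) = t.take K ++ [t[K]] := by
    rw [List.take_succ]
    simp [List.getElem?_eq_getElem hKt]
  have hrep : List.replicate (N - K) (1 : Int) = 1 :: List.replicate (N - (K + 1)) 1 := by
    have : N - K = (N - (K + 1)) + 1 := by omega
    rw [this, List.replicate_succ]
  have hgetK : t.getD K 0 = t[K] := List.getD_eq_getElem t 0 hKt
  unfold pvArr
  rw [List.set_append_right K _ (by omega)]
  rw [hlenK]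
  simp only [Nat.sub_self]
  rw [hrep, List.set_cons_zero, htake, pvDps_append]
  simp [List.getElem?_eq_getElem hKt]

-- full outer loop of A
theorem pv_outerA (s : List Int) (N : Nat) (hN : N ≤ s.length) :
    ∀ (K : Nat), K ≤ N →
      (List.range K).foldl (fun (dp : List Int) (k : Nat) =>
        (PySem.List.pyRange ((k : Int) - 1) (-1) (-1)).foldl (fun dp j =>
          if PySem.List.pyGetD s j 0 * PySem.List.pyGetD s j 0 = PySem.List.pyGetD s (k : Int) 0 then
            PySem.List.pySetD dp (k : Int)
              (max (PySem.List.pyGetD dp (k : Int) 0) (1 + PySem.List.pyGetD dp j 0))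
          else dp) dp) (List.replicate N 1)
        = pvArr (s.take N) N K := by
  intro K
  induction K with
  | zero =>
      intro _
      simp [pvArr, pvDps]
  | succ K ih =>
      intro hK1
      have hK : K < N := by omega
      have ht : (s.take N).length = N := by simp; omega
      rw [List.range_succ, List.foldl_append, List.foldl_cons, List.foldl_nil, ih (by omega)]
      set t := s.take N with htdef
      set acc := pvDps [] (t.take K) with haccdef
      set dp := pvArr t N K with hdpdef
      have hdplen : dp.length = N := pvArr_length t N K (by omega) ht
      have hacclen : acc.length = K := by
        rw [haccdef, pvDps_length]
        simp [ht]; omega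
      -- the inner scan
      have hkl : ∀ j ∈ PySem.List.pyRange ((K : Int) - 1) (-1) (-1),
          ∃ k : Nat, j = (k : Int) ∧ k < K := by
        intro j hj
        rw [PySem.List.mem_pyRange_neg_one] at hj
        exact ⟨j.toNat, by omega, by omega⟩
      rw [pv_innerA s K N hK _ dp hdplen hkl]
      -- turn the descending index fold into pvMM
      have hrev : PySem.List.pyRange ((K : Int) - 1) (-1) (-1)
          = ((List.range K).map (fun k : Nat => (k : Int))).reverse := by
        rw [PySem.List.pyRange_neg_one_eq_reverse]
        have : (K : Int) - 1 + 1 = (K : Int) := by omega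
        rw [this, PySem.List.pyRange_one]
        simp
      have hinitK : PySem.List.pyGetD dp (K : Int) 0 = 1 := by
        rw [PySem.List.pyGetD_natCast, hdpdef]
        unfold pvArr
        rw [← haccdef]
        have hml : (acc.map (·.2)).length = K := by simp [hacclen]
        rw [List.getD_append_right _ _ _ _ (by omega), hml, Nat.sub_self]
        have h0 : 0 < N - K := by omega
        rw [List.getD_eq_getElem _ _ (by simpa using h0)]
        simp [List.getElem_replicate]
      have hsK : K < s.length := by omega
      have hcongr : ∀ (m : Int), ∀ k ∈ List.range K,
          (if PySem.List.pyGetD s (k : Int) 0 * PySem.List.pyGetD s (k : Int) 0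
              = PySem.List.pyGetD s (K : Int) 0
            then max m (1 + PySem.List.pyGetD dp (k : Int) 0) else m)
          = (if (acc.getD k (0, 0)).1 * (acc.getD k (0, 0)).1 = PySem.List.pyGetD s (K : Int) 0
            then max m (1 + (acc.getD k (0, 0)).2) else m) := by
        intro m k hkmem
        have hkK : k < K := List.mem_range.1 hkmem
        have hkacc : k < acc.length := by omega
        have hfst : (acc.getD k (0, 0)).1 = PySem.List.pyGetD s (k : Int) 0 := by
          have h1 : (acc.map (·.1)).getD k 0 = (acc.getD k (0, 0)).1 := by
            rw [List.getD_eq_getElem _ _ (by simpa using hkacc),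
              List.getD_eq_getElem _ _ hkacc, List.getElem_map]
          have h2 : acc.map (·.1) = t.take K := by
            rw [haccdef, pvDps_fst]; simp
          have hkt : k < (t.take K).length := by
            simp [ht]; omega
          rw [PySem.List.pyGetD_natCast, ← h1, h2,
            List.getD_eq_getElem _ _ hkt, List.getElem_take,
            List.getD_eq_getElem _ _ (show k < s.length by omega)]
          simp only [htdef, List.getElem_take]
        have hsnd : (acc.getD k (0, 0)).2 = PySem.List.pyGetD dp (k : Int) 0 := by
          rw [PySem.List.pyGetD_natCast, hdpdef]
          unfold pvArr
          rw [← haccdef, List.getD_append _ _ _ _ (by simpa using hkacc),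
            List.getD_eq_getElem _ _ hkacc,
            List.getD_eq_getElem _ _ (show k < (acc.map (fun x => x.2)).length by simpa using hkacc),
            List.getElem_map]
        rw [hfst, hsnd]
      have hX : PySem.List.pyGetD s (K : Int) 0 = t.getD K 0 := by
        have hkt : K < t.length := by omega
        rw [PySem.List.pyGetD_natCast, List.getD_eq_getElem _ _ hkt,
          List.getD_eq_getElem _ _ hsK]
        simp only [htdef, List.getElem_take]
      rw [hrev, ← List.map_reverse, List.foldl_map, pv_foldl_if_max_reverse
        (fun k : Nat => PySem.List.pyGetD s (k : Int) 0 * PySem.List.pyGetD s (k : Int) 0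
          = PySem.List.pyGetD s (K : Int) 0)
        (fun k : Nat => 1 + PySem.List.pyGetD dp (k : Int) 0)]
      rw [PySem.List.foldl_congr_mem (List.range K) _ _ _ hcongr]
      rw [hinitK]
      have hfi := pv_fold_idx (PySem.List.pyGetD s (K : Int) 0) acc
      rw [hacclen] at hfi
      rw [hfi, hX]
      exact pvArr_succ t N K hK ht

-- B's fold invariant: the dict holds pvMM, the collected chain lengths are pvDps' second components
theorem pv_b_inv :
    ∀ (r : List Int) (acc : List (Int × Int)) (chains : List Int) (pend : PySem.Dict Int Int),
      (∀ v, pend.getD v 0 = pvMM acc v) →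
      chains = acc.map (·.2) →
      (r.foldl (fun (p : List Int × PySem.Dict Int Int) x =>
          let cur := p.2.getD x 0 + 1
          let chains := p.1 ++ [cur]
          let pend := if p.2.getD (x * x) 0 < cur then p.2.insert (x * x) cur else p.2
          (chains, pend)) (chains, pend)).1
        = (pvDps acc r).map (·.2) := by
  intro r
  induction r with
  | nil => intro acc chains pend h1 h2; simpa [pvDps] using h2
  | cons x rest ih =>
      intro acc chains pend h1 h2
      simp only [List.foldl_cons]
      have hgx := h1 x
      have hgxx := h1 (x * x)
      have hchains' : chains ++ [pend.getD x 0 + 1]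
          = ((acc ++ [(x, 1 + pvMM acc x)]).map (·.2)) := by
        have hcc : pend.getD x 0 + 1 = 1 + pvMM acc x := by omega
        rw [h2, hcc]
        simp
      have hpend' : ∀ v,
          (if pend.getD (x * x) 0 < pend.getD x 0 + 1
            then pend.insert (x * x) (pend.getD x 0 + 1) else pend).getD v 0
            = pvMM (acc ++ [(x, 1 + pvMM acc x)]) v := by
        intro v
        have hgv := h1 v
        rw [pvMM_append]
        by_cases hlt : pend.getD (x * x) 0 < pend.getD x 0 + 1
        · rw [if_pos hlt, PySem.Dict.getD_insert]
          by_cases hveq : v = x * x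
          · rw [if_pos hveq, if_pos hveq.symm]
            subst hveq
            have hle : pvMM acc (x * x) ≤ 1 + pvMM acc x := by omega
            have hmx := max_eq_right hle
            omega
          · rw [if_neg hveq, if_neg (fun hh => hveq hh.symm), h1]
        · rw [if_neg hlt]
          by_cases hveq : x * x = v
          · rw [if_pos hveq, hgv, ← hveq]
            have hge : 1 + pvMM acc x ≤ pvMM acc (x * x) := by omega
            have hmx := max_eq_left hge
            omega
          · rw [if_neg hveq, hgv]
      have := ih (acc ++ [(x, 1 + pvMM acc x)]) _ _ hpend' hchains'
      simpa [pvDps] using this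

-- ===== VERDICT (by name: the statement is the Claim_ definition above) =====
theorem get_max_perfect_set_spec : Claim_equal_get_max_perfect_set := by
  unfold Claim_equal_get_max_perfect_set
  intro n lst _ hpre
  unfold Pre_get_max_perfect_set at hpre
  unfold Spec_get_max_perfect_set
  unfold get_max_perfect_set get_max_perfect_set_alt
  simp only []
  set s := PySem.List.sorted lst (fun x => x) with hsdef
  have hslen : s.length = lst.length := PySem.List.length_sorted lst _ _
  set N := n.toNat with hNdef
  have hN1 : 1 ≤ N := by omega
  have hNs : N ≤ s.length := by omega
  set t := s.take N with htdef
  have ht : t.length = N := by simp [htdef]; omega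
  -- A's dp array
  have houter : (PySem.List.pyRange 0 n).foldl (fun dp i =>
      (PySem.List.pyRange (i - 1) (-1) (-1)).foldl (fun dp j =>
        if PySem.List.pyGetD s j 0 * PySem.List.pyGetD s j 0 = PySem.List.pyGetD s i 0 then
          PySem.List.pySetD dp i (max (PySem.List.pyGetD dp i 0) (1 + PySem.List.pyGetD dp j 0))
        else dp) dp) (List.replicate N 1)
      = pvArr t N N := by
    rw [PySem.List.pyRange_one]
    simp only [sub_zero, ← hNdef, List.foldl_map, zero_add]
    exact pv_outerA s N hNs N (le_refl N)
  rw [houter]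
  have harr : pvArr t N N = (pvDps [] t).map (·.2) := by
    unfold pvArr
    rw [List.take_of_length_le (by omega), Nat.sub_self]
    simp
  rw [harr]
  -- B's index loop reads exactly t
  have hread : ∀ (p : List Int × PySem.Dict Int Int), ∀ k ∈ List.range N,
      (fun (p : List Int × PySem.Dict Int Int) (k : Nat) =>
        let x := PySem.List.pyGetD s (k : Int) 0
        let cur := p.2.getD x 0 + 1
        let chains := p.1 ++ [cur]
        let pend := if p.2.getD (x * x) 0 < cur then p.2.insert (x * x) cur else p.2
        ((chains, pend) : List Int × PySem.Dict Int Int)) p k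
      = (fun (p : List Int × PySem.Dict Int Int) (k : Nat) =>
          (fun (p : List Int × PySem.Dict Int Int) (x : Int) =>
            let cur := p.2.getD x 0 + 1
            let chains := p.1 ++ [cur]
            let pend := if p.2.getD (x * x) 0 < cur then p.2.insert (x * x) cur else p.2
            ((chains, pend) : List Int × PySem.Dict Int Int)) p (t.getD k 0)) p k := by
    intro p k hk
    have hkN : k < N := List.mem_range.1 hk
    have hx : PySem.List.pyGetD s (k : Int) 0 = t.getD k 0 := by
      have hkt : k < t.length := by omega
      rw [PySem.List.pyGetD_natCast, List.getD_eq_getElem _ _ hkt,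
        List.getD_eq_getElem _ _ (show k < s.length by omega)]
      simp only [htdef, List.getElem_take]
    simp only [hx]
  have hbfold : (PySem.List.pyRange 0 n).foldl
      (fun (p : List Int × PySem.Dict Int Int) i =>
        let x := PySem.List.pyGetD s i 0
        let cur := p.2.getD x 0 + 1
        let chains := p.1 ++ [cur]
        let pend := if p.2.getD (x * x) 0 < cur then p.2.insert (x * x) cur else p.2
        (chains, pend)) ([], PySem.Dict.empty)
      = t.foldl (fun (p : List Int × PySem.Dict Int Int) x =>
          let cur := p.2.getD x 0 + 1
          let chains := p.1 ++ [cur]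
          let pend := if p.2.getD (x * x) 0 < cur then p.2.insert (x * x) cur else p.2
          (chains, pend)) ([], PySem.Dict.empty) := by
    rw [PySem.List.pyRange_one]
    simp only [sub_zero, ← hNdef, List.foldl_map, zero_add]
    rw [PySem.List.foldl_congr_mem (List.range N) _ _ _ hread]
    have hfold := pv_foldl_range_getD
      (fun (p : List Int × PySem.Dict Int Int) (x : Int) =>
        let cur := p.2.getD x 0 + 1
        let chains := p.1 ++ [cur]
        let pend := if p.2.getD (x * x) 0 < cur then p.2.insert (x * x) cur else p.2
        ((chains, pend) : List Int × PySem.Dict Int Int)) (0 : Int) t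
      (([], PySem.Dict.empty) : List Int × PySem.Dict Int Int)
    rw [ht] at hfold
    rw [hfold]
  rw [hbfold]
  -- B's fold collects exactly the same chain lengths
  have hb := pv_b_inv t [] [] PySem.Dict.empty
    (fun v => by simp [PySem.Dict.getD_empty, pvMM]) (by simp)
  rw [hb]
  -- both sides wrap the same maximum
  have hlen2 : ((pvDps [] t).map (·.2)).length = N := by
    rw [List.length_map, pvDps_length]; simpa using ht
  obtain ⟨x, tail, hxt⟩ : ∃ x tail, (pvDps [] t).map (·.2) = x :: tail := by
    cases hq : (pvDps [] t).map (·.2) with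
    | nil => rw [hq] at hlen2; simp at hlen2; omega
    | cons x tail => exact ⟨x, tail, rfl⟩
  have hx1 : (1 : Int) ≤ x := by
    have hmem : x ∈ (pvDps [] t).map (·.2) := by rw [hxt]; exact List.mem_cons_self
    obtain ⟨p, hp, hpy⟩ := List.mem_map.1 hmem
    have := pvDps_snd_ge_one t [] (by simp) p hp
    omega
  rw [hxt, PySem.List.max?_id_cons]
  simp only [Option.getD_some]
  have hm1 : x ≤ tail.foldl max x := (PySem.List.le_foldl_max tail x).1
  split_ifs with h1 h2 h2 <;> omega
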